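-- pv_equiv track=rewrite | github.com/weka511/bioinformatics | helpers.py | create_binomial
-- ===== SOURCE A (Python) =====
-- def binomial_index(n,k):
--     return n*(n+1)//2+k
--
-- def create_binomial(n):
--     def binomial(n,k,c):
--         if k>0 and k<n:
--             ii=binomial_index(n-1,k)
--             return c[ii-1]+c[ii]
--         return 1
--     c=[]
--     for nn in range(n):
--         for k in range(nn+1):
--             c.append(binomial(nn,k,c))
--     return c
-- ===== SOURCE B (Python) =====
-- def create_binomial(n):
--     c = []
--     for nn in range(n):
--         val = 1
--         c.append(val)
--         for k in range(1, nn + 1):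
--             val = val * (nn - k + 1) // k
--             c.append(val)
--     return c
-- ===== Notes on version B (the rewrite author's own statement) =====
-- stated objective: alternative
-- what changed: Each row is generated with the multiplicative recurrence val = val*(nn-k+1)//k on a single running coefficient, instead of looking back into the flattened array via the triangular index binomial_index; it trades cross-row indexed lookups for per-row big-integer multiply/divide steps at similar overall cost.
import Mathlib
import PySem

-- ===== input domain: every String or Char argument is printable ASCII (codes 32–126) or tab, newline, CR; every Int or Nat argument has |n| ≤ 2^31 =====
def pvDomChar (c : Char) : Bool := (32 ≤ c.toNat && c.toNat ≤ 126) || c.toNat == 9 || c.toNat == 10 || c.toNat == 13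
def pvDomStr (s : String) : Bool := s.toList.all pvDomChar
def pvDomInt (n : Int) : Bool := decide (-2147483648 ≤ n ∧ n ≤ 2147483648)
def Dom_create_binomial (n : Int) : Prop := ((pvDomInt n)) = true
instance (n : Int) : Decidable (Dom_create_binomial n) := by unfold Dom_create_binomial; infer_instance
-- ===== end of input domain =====

-- B replaces A's cross-row lookups through the triangular index with a single running
-- multiplicative coefficient per row (an alternative algorithm of similar cost).

-- ===== PORT A =====
def binomial_index (n k : Int) : Int := PySem.Int.floordiv (n * (n + 1)) 2 + k

-- A's inner helper `binomial`; the list indexing c[ii-1], c[ii] is always in range on the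
-- inputs A feeds it (proved below), so pyGetD with default 0 is exact here.
def binomA (n k : Int) (c : List Int) : Int :=
  if k > 0 ∧ k < n then
    let ii := binomial_index (n - 1) k
    PySem.List.pyGetD c (ii - 1) 0 + PySem.List.pyGetD c ii 0
  else 1

def create_binomial (n : Int) : List Int :=
  (PySem.List.pyRange 0 n 1).foldl (fun c nn =>
    (PySem.List.pyRange 0 (nn + 1) 1).foldl (fun c k => c ++ [binomA nn k c]) c) []

-- ===== PORT B =====
def create_binomial_alt (n : Int) : List Int :=
  (PySem.List.pyRange 0 n 1).foldl (fun c nn =>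
    ((PySem.List.pyRange 1 (nn + 1) 1).foldl
      (fun (s : List Int × Int) k =>
        let val := PySem.Int.floordiv (s.2 * (nn - k + 1)) k
        (s.1 ++ [val], val)) (c ++ [1], 1)).1) []

-- ===== PRECONDITION & SPEC =====
def Spec_create_binomial (n : Int) (out : List Int) : Prop := out = create_binomial_alt n
instance (n : Int) (out : List Int) : Decidable (Spec_create_binomial n out) := by unfold Spec_create_binomial; infer_instance

-- ===== CLAIM (what is proved, stated in full; the proofs are below) =====
def Claim_equal_create_binomial : Prop := ∀ (n : Int), Dom_create_binomial n → Spec_create_binomial n (create_binomial n)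

-- ===== LEMMAS AND PROOFS =====

/-- Triangular numbers: length of the flattened triangle. -/
def tri : Nat → Nat
  | 0 => 0
  | m + 1 => tri m + (m + 1)

/-- Row `nn` of Pascal's triangle. -/
def pascalRow (nn : Nat) : List Int := (List.range (nn + 1)).map (fun k => ((nn.choose k : Nat) : Int))

/-- The flattened triangle of `m` rows. -/
def pascalFlat (m : Nat) : List Int := (List.range m).flatMap pascalRow

theorem pascalFlat_succ (m : Nat) : pascalFlat (m + 1) = pascalFlat m ++ pascalRow m := by
  simp [pascalFlat, List.range_succ]

theorem length_pascalRow (m : Nat) : (pascalRow m).length = m + 1 := by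
  simp [pascalRow]

theorem length_pascalFlat (m : Nat) : (pascalFlat m).length = tri m := by
  induction m with
  | zero => simp [pascalFlat, tri]
  | succ m ih => rw [pascalFlat_succ]; simp [tri, ih, length_pascalRow]

theorem tri_mono {i m : Nat} (h : i ≤ m) : tri i ≤ tri m := by
  induction m with
  | zero =>
    have h0 : i = 0 := Nat.le_zero.mp h
    subst h0; exact le_rfl
  | succ m ih =>
    rcases Nat.lt_or_ge i (m + 1) with h' | h'
    · have h2 := ih (by omega)
      have h3 : tri m ≤ tri (m + 1) := by simp [tri]
      omega
    · have h4 : i = m + 1 := by omega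
      subst h4; exact le_rfl

theorem tri_cast (i : Nat) : (tri i : Int) = PySem.Int.floordiv ((i : Int) * ((i : Int) + 1)) 2 := by
  induction i with
  | zero => simp [tri, PySem.Int.floordiv]
  | succ i ih =>
    rw [PySem.Int.floordiv_eq_ediv_of_pos (by omega)] at ih ⊢
    simp only [tri]
    push_cast
    rw [ih]
    have h2 : ((i : Int) + 1) * ((i : Int) + 1 + 1) = (i : Int) * ((i : Int) + 1) + ((i : Int) + 1) * 2 := by ring
    rw [h2, Int.add_mul_ediv_right _ _ (by omega : (2 : Int) ≠ 0)]

theorem getD_pascalRow (m k : Nat) (hk : k ≤ m) :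
    (pascalRow m).getD k 0 = ((m.choose k : Nat) : Int) := by
  have : k < (pascalRow m).length := by rw [length_pascalRow]; omega
  rw [List.getD_eq_getElem _ _ this]
  simp [pascalRow]

theorem getD_pascalFlat (m i k : Nat) (him : i < m) (hk : k ≤ i) :
    (pascalFlat m).getD (tri i + k) 0 = ((i.choose k : Nat) : Int) := by
  induction m with
  | zero => omega
  | succ m ih =>
    rw [pascalFlat_succ]
    rcases Nat.lt_or_ge i m with h' | h'
    · have hlt : tri i + k < (pascalFlat m).length := by
        rw [length_pascalFlat]
        have h1 : tri (i + 1) ≤ tri m := tri_mono h'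
        simp [tri] at h1; omega
      rw [List.getD_append _ _ _ _ hlt]
      exact ih h'
    · have hi : i = m := by omega
      subst hi
      rw [List.getD_append_right _ _ _ _ (by rw [length_pascalFlat]; omega)]
      rw [length_pascalFlat, Nat.add_sub_cancel_left]
      exact getD_pascalRow _ _ hk

/-- pyGetD on a prefix-stable list via getD (nonneg in-range index). -/
theorem pyGetD_eq_getD (xs : List Int) (i : Nat) :
    PySem.List.pyGetD xs (i : Int) 0 = xs.getD i 0 := by
  simp [PySem.List.pyGetD_natCast]

theorem binomA_eval (nn k : Nat) (extra : List Int) (hk : k ≤ nn) :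
    binomA (nn : Int) (k : Int) (pascalFlat nn ++ extra) = ((nn.choose k : Nat) : Int) := by
  unfold binomA
  by_cases h : (k : Int) > 0 ∧ (k : Int) < (nn : Int)
  · have hk0 : 0 < k := by exact_mod_cast h.1
    have hkn : k < nn := by exact_mod_cast h.2
    rw [if_pos h]
    have hnn1 : ((nn : Int) - 1) = ((nn - 1 : Nat) : Int) := by omega
    have hii : binomial_index ((nn : Int) - 1) (k : Int) = ((tri (nn - 1) + k : Nat) : Int) := by
      unfold binomial_index
      rw [hnn1, ← tri_cast (nn - 1)]
      push_cast; ring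
    have hii1 : binomial_index ((nn : Int) - 1) (k : Int) - 1 = ((tri (nn - 1) + (k - 1) : Nat) : Int) := by
      rw [hii]; omega
    -- both indices lie inside the prefix pascalFlat nn
    have hlen : ∀ j : Nat, j ≤ nn - 1 → tri (nn - 1) + j < (pascalFlat nn).length := by
      intro j hj
      rw [length_pascalFlat]
      have : tri ((nn - 1) + 1) ≤ tri nn := tri_mono (by omega)
      simp [tri] at this; omega
    have e1 : PySem.List.pyGetD (pascalFlat nn ++ extra) (binomial_index ((nn:Int)-1) (k:Int) - 1) 0
        = (((nn - 1).choose (k - 1) : Nat) : Int) := by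
      rw [hii1, pyGetD_eq_getD, List.getD_append _ _ _ _ (hlen _ (by omega))]
      exact getD_pascalFlat nn (nn - 1) (k - 1) (by omega) (by omega)
    have e2 : PySem.List.pyGetD (pascalFlat nn ++ extra) (binomial_index ((nn:Int)-1) (k:Int)) 0
        = (((nn - 1).choose k : Nat) : Int) := by
      rw [hii, pyGetD_eq_getD, List.getD_append _ _ _ _ (hlen _ (by omega))]
      exact getD_pascalFlat nn (nn - 1) k (by omega) (by omega)
    simp only [e1, e2]
    have hp : nn.choose k = (nn - 1).choose (k - 1) + (nn - 1).choose k := by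
      obtain ⟨n', rfl⟩ : ∃ n', nn = n' + 1 := ⟨nn - 1, by omega⟩
      obtain ⟨k', rfl⟩ : ∃ k', k = k' + 1 := ⟨k - 1, by omega⟩
      simp [Nat.choose_succ_succ]
    rw [hp]; push_cast; ring
  · rw [if_neg h]
    have hor : k = 0 ∨ k = nn := by omega
    rcases hor with h0 | h0 <;> subst h0 <;> simp [Nat.choose_self]

/-- A's inner loop builds row nn on top of the triangle. -/
theorem rowA (nn : Nat) (j : Nat) (hj : j ≤ nn + 1) :
    (PySem.List.pyRange 0 (j : Int) 1).foldl (fun c k => c ++ [binomA (nn : Int) k c]) (pascalFlat nn)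
      = pascalFlat nn ++ (pascalRow nn).take j := by
  induction j with
  | zero => simp [PySem.List.pyRange_one_eq_nil]
  | succ j ih =>
    have hcast : ((j + 1 : Nat) : Int) = (j : Int) + 1 := by push_cast; ring
    rw [hcast, PySem.List.pyRange_one_succ_right (by omega), List.foldl_append, ih (by omega)]
    simp only [List.foldl_cons, List.foldl_nil]
    rw [binomA_eval nn j _ (by omega)]
    have hjl : j < (pascalRow nn).length := by rw [length_pascalRow]; omega
    rw [List.take_add_one, List.getElem?_eq_getElem hjl]
    have : (pascalRow nn)[j] = ((nn.choose j : Nat) : Int) := by simp [pascalRow]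
    rw [this]
    simp

/-- The exact-division step of B. -/
theorem b_step (nn k : Nat) (hk1 : 1 ≤ k) (hkn : k ≤ nn) :
    PySem.Int.floordiv (((nn.choose (k - 1) : Nat) : Int) * ((nn : Int) - (k : Int) + 1)) (k : Int)
      = ((nn.choose k : Nat) : Int) := by
  have h : nn.choose k * k = nn.choose (k - 1) * (nn - (k - 1)) := by
    have h4 : k = (k - 1) + 1 := by omega
    rw [h4]
    exact Nat.choose_succ_right_eq nn (k - 1)
  have hsub : ((nn - (k - 1) : Nat) : Int) = (nn : Int) - (k : Int) + 1 := by omega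
  have h' : ((nn.choose (k - 1) : Nat) : Int) * ((nn : Int) - (k : Int) + 1) = ((nn.choose k : Nat) : Int) * (k : Int) := by
    rw [← hsub, ← Nat.cast_mul, ← Nat.cast_mul]
    exact_mod_cast h.symm
  rw [h', PySem.Int.floordiv_eq_ediv_of_pos (by omega)]
  exact Int.mul_ediv_cancel _ (by omega)

/-- B's inner loop builds row nn with the running coefficient. -/
theorem rowB (nn : Nat) (j : Nat) (hj1 : 1 ≤ j) (hj : j ≤ nn + 1) :
    (PySem.List.pyRange 1 (j : Int) 1).foldl
        (fun (s : List Int × Int) k =>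
          let val := PySem.Int.floordiv (s.2 * ((nn : Int) - k + 1)) k
          (s.1 ++ [val], val)) (pascalFlat nn ++ [1], 1)
      = (pascalFlat nn ++ (pascalRow nn).take j, ((nn.choose (j - 1) : Nat) : Int)) := by
  induction j with
  | zero => omega
  | succ j ih =>
    rcases Nat.eq_zero_or_pos j with h0 | h0
    · subst h0
      have ht : (pascalRow nn).take 1 = [1] := by
        simp [pascalRow, List.range_succ_eq_map]
      rw [show ((0 + 1 : Nat) : Int) = 1 by norm_num, PySem.List.pyRange_one_eq_nil (by omega)]
      simp [ht]
    · have hcast : ((j + 1 : Nat) : Int) = (j : Int) + 1 := by push_cast; ring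
      rw [hcast, PySem.List.pyRange_one_succ_right (by omega : (1:Int) ≤ (j:Int)), List.foldl_append,
        ih h0 (by omega)]
      simp only [List.foldl_cons, List.foldl_nil]
      have hstep : PySem.Int.floordiv (((nn.choose (j - 1) : Nat) : Int) * ((nn : Int) - (j : Int) + 1)) (j : Int)
          = ((nn.choose j : Nat) : Int) := b_step nn j h0 (by omega)
      simp only [hstep]
      have hjl : j < (pascalRow nn).length := by rw [length_pascalRow]; omega
      rw [List.take_add_one, List.getElem?_eq_getElem hjl]
      have hg : (pascalRow nn)[j] = ((nn.choose j : Nat) : Int) := by simp [pascalRow]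
      rw [hg]
      simp

theorem outerA (m : Nat) :
    (PySem.List.pyRange 0 (m : Int) 1).foldl (fun c nn =>
      (PySem.List.pyRange 0 (nn + 1) 1).foldl (fun c k => c ++ [binomA nn k c]) c) []
      = pascalFlat m := by
  induction m with
  | zero => simp [PySem.List.pyRange_one_eq_nil, pascalFlat]
  | succ m ih =>
    have hcast : ((m + 1 : Nat) : Int) = (m : Int) + 1 := by push_cast; ring
    rw [hcast, PySem.List.pyRange_one_succ_right (by omega), List.foldl_append, ih]
    simp only [List.foldl_cons, List.foldl_nil]
    have hcast2 : (m : Int) + 1 = ((m + 1 : Nat) : Int) := by push_cast; ring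
    rw [hcast2, rowA m (m + 1) (by omega)]
    rw [List.take_of_length_le (by rw [length_pascalRow])]
    exact (pascalFlat_succ m).symm

theorem outerB (m : Nat) :
    (PySem.List.pyRange 0 (m : Int) 1).foldl (fun c nn =>
      ((PySem.List.pyRange 1 (nn + 1) 1).foldl
        (fun (s : List Int × Int) k =>
          let val := PySem.Int.floordiv (s.2 * (nn - k + 1)) k
          (s.1 ++ [val], val)) (c ++ [1], 1)).1) []
      = pascalFlat m := by
  induction m with
  | zero => simp [PySem.List.pyRange_one_eq_nil, pascalFlat]
  | succ m ih =>
    have hcast : ((m + 1 : Nat) : Int) = (m : Int) + 1 := by push_cast; ring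
    rw [hcast, PySem.List.pyRange_one_succ_right (by omega), List.foldl_append, ih]
    simp only [List.foldl_cons, List.foldl_nil]
    have hcast2 : (m : Int) + 1 = ((m + 1 : Nat) : Int) := by push_cast; ring
    rw [hcast2, rowB m (m + 1) (by omega) (by omega)]
    rw [List.take_of_length_le (by rw [length_pascalRow])]
    exact (pascalFlat_succ m).symm

-- ===== VERDICT (by name: the statement is the Claim_ definition above) =====
theorem create_binomial_spec : Claim_equal_create_binomial := by
  intro n _
  unfold Spec_create_binomial create_binomial create_binomial_alt
  rcases Int.lt_or_le 0 n with h | h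
  · have hn : n = ((n.toNat : Nat) : Int) := by omega
    rw [hn, outerA, outerB]
  · rw [PySem.List.pyRange_one_eq_nil h]
    rfl
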